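-- pv_equiv track=rewrite | github.com/MatiasRodriguez-1/TPO-Algoritmos-y-estructuras-de-datos-1 | Algoritmia_TP_Lopez Joaquin, Rodriguez Matias, Barbieri y Pierre.py | mostrarEstadoSala
-- ===== SOURCE A (Python) =====
-- def mostrarEstadoSala(asientos,asientos2,asientos3):
--     #Cantidad de asientos ocupados en cada sala
--     cont1=0
--     cont2=0
--     cont3=0
--     #Lista con los estados de cada sala
--     estados=[]
--     #Si el asiento esta ocupado, el contador aumenta su valor en 1
--     for i in range (len(asientos)):
--         if (asientos[i]==True):
--             cont1=cont1+1
--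
--     for i in range (len(asientos2)):
--         if (asientos2[i]==True):
--             cont2=cont2+1
--
--     for i in range (len(asientos3)):
--         if (asientos3[i]==True):
--             cont3=cont3+1
--     #Dependiendo la relacion de asientos ocupados con los asientos totales
--     if (cont1==len(asientos)):
--         #lleno, la sala no puede ser elegida para reservar mas asientos
--         estado1=1
--     elif(cont1==0):
--         #vacio, la sala no puede ser elegida para eliminar reservas
--         estado1=0
--     else:
--         #mixto, la sala puede ser elegida para reservar como para eliminar
--         estado1=2
--
--     if (cont2==len(asientos2)):
--         estado2=1
--     elif(cont2==0):
--         estado2=0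
--     else:
--         estado2=2
--
--     if (cont3==len(asientos3)):
--         estado3=1
--     elif(cont3==0):
--         estado3=0
--     else:
--         estado3=2
--
--     #se agregan los estados la lista de estados
--     estados.append(estado1)
--     estados.append(estado2)
--     estados.append(estado3)
--     return estados
-- ===== SOURCE B (Python) =====
-- def mostrarEstadoSala(asientos, asientos2, asientos3):
--     # Classify each sala by WHICH seat values occur (a set of distinct values),
--     # then read the state off a 4-entry table indexed by the two membership bits.
--     # bit0 = some occupied seat present, bit1 = some free seat present.
--     # {}->1 (empty list counts as full, like A), {True}->1, {False}->0, {True,False}->2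
--     TABLA = [1, 1, 0, 2]
--     estados = []
--     for sala in (asientos, asientos2, asientos3):
--         vistos = set(sala)
--         estados.append(TABLA[2 * (False in vistos) + (True in vistos)])
--     return estados
-- ===== Notes on version B (the rewrite author's own statement) =====
-- stated objective: alternative
-- what changed: Instead of counting occupied seats with index loops and comparing the count with the length in three if/elif/else blocks, B builds the set of distinct seat values per sala and reads the state from a 4-entry lookup table indexed by the two membership bits (free-seat-present, occupied-seat-present), with no conditionals.
import Mathlib
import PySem

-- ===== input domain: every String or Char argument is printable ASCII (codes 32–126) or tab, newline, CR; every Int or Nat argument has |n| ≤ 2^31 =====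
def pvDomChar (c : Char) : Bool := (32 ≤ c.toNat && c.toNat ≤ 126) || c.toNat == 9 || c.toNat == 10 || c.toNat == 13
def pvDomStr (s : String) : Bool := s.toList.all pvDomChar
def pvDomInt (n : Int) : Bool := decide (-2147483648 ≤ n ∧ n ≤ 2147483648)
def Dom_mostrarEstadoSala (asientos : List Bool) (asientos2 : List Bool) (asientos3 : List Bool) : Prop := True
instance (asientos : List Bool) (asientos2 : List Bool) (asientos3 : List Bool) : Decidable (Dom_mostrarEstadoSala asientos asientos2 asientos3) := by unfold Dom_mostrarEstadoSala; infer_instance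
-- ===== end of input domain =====

-- ===== PORT A =====
-- B replaces A's count-then-compare classification by a set of distinct seat values and a
-- branch-free 4-entry table lookup indexed by the two membership bits (objective: alternative).
def mostrarEstadoSala (asientos : List Bool) (asientos2 : List Bool) (asientos3 : List Bool) : List Int :=
  let cont1 : Int := (PySem.List.pyRange 0 asientos.length 1).foldl
    (fun c i => if PySem.List.pyGetD asientos i false == true then c + 1 else c) 0
  let cont2 : Int := (PySem.List.pyRange 0 asientos2.length 1).foldl
    (fun c i => if PySem.List.pyGetD asientos2 i false == true then c + 1 else c) 0
  let cont3 : Int := (PySem.List.pyRange 0 asientos3.length 1).foldl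
    (fun c i => if PySem.List.pyGetD asientos3 i false == true then c + 1 else c) 0
  let estado1 : Int := if cont1 = (asientos.length : Int) then 1 else if cont1 = 0 then 0 else 2
  let estado2 : Int := if cont2 = (asientos2.length : Int) then 1 else if cont2 = 0 then 0 else 2
  let estado3 : Int := if cont3 = (asientos3.length : Int) then 1 else if cont3 = 0 then 0 else 2
  ((([] : List Int) ++ [estado1]) ++ [estado2]) ++ [estado3]

-- ===== PORT B =====
def pvTabla : List Int := [1, 1, 0, 2]

def mostrarEstadoSala_alt (asientos : List Bool) (asientos2 : List Bool) (asientos3 : List Bool) : List Int :=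
  [asientos, asientos2, asientos3].foldl
    (fun estados sala =>
      let vistos : PySem.Set Bool := PySem.Set.ofList sala
      estados ++ [PySem.List.pyGetD pvTabla
        (2 * (if PySem.Set.contains vistos false then (1 : Int) else 0)
          + (if PySem.Set.contains vistos true then (1 : Int) else 0)) 0]) []

-- ===== PRECONDITION & SPEC =====
def Spec_mostrarEstadoSala (asientos : List Bool) (asientos2 : List Bool) (asientos3 : List Bool) (out : List Int) : Prop := out = mostrarEstadoSala_alt asientos asientos2 asientos3
instance (asientos : List Bool) (asientos2 : List Bool) (asientos3 : List Bool) (out : List Int) : Decidable (Spec_mostrarEstadoSala asientos asientos2 asientos3 out) := by unfold Spec_mostrarEstadoSala; infer_instance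

-- ===== CLAIM (what is proved, stated in full; the proofs are below) =====
def Claim_equal_mostrarEstadoSala : Prop := ∀ (asientos : List Bool) (asientos2 : List Bool) (asientos3 : List Bool), Dom_mostrarEstadoSala asientos asientos2 asientos3 → Spec_mostrarEstadoSala asientos asientos2 asientos3 (mostrarEstadoSala asientos asientos2 asientos3)

-- ===== LEMMAS AND PROOFS =====

lemma foldl_count_eq (xs : List Bool) (n : Int) :
    xs.foldl (fun c b => if b == true then c + 1 else c) n
      = n + (xs.countP (fun x => x == true) : Int) := by
  induction xs generalizing n with
  | nil => simp
  | cons b xs ih =>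
    simp only [List.foldl_cons, List.countP_cons, ih]
    by_cases hb : b = true <;> simp [hb] <;> ring

lemma cnt_eq (xs : List Bool) :
    (PySem.List.pyRange 0 xs.length 1).foldl
      (fun c i => if PySem.List.pyGetD xs i false == true then c + 1 else c) 0
      = (xs.countP (fun x => x == true) : Int) := by
  rw [PySem.List.foldl_pyRange_zero_pyGetD' xs false
      (fun c b => if b == true then c + 1 else c) 0, foldl_count_eq]
  simp

lemma contains_ofList_eq (xs : List Bool) (x : Bool) :
    PySem.Set.contains (PySem.Set.ofList xs) x = decide (x ∈ xs) := by
  by_cases h : x ∈ xs <;>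
    simp [PySem.Set.mem_ofList, h]

lemma estado_eq (xs : List Bool) :
    (if ((xs.countP (fun x => x == true) : Int)) = (xs.length : Int) then (1 : Int)
     else if ((xs.countP (fun x => x == true) : Int)) = 0 then 0 else 2)
      = PySem.List.pyGetD pvTabla
          (2 * (if PySem.Set.contains (PySem.Set.ofList xs) false then (1 : Int) else 0)
            + (if PySem.Set.contains (PySem.Set.ofList xs) true then (1 : Int) else 0)) 0 := by
  rw [contains_ofList_eq, contains_ofList_eq]
  by_cases hf : false ∈ xs
  · by_cases ht : true ∈ xs
    · have h1 : xs.countP (fun x => x == true) ≠ xs.length := by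
        intro h
        have := List.countP_eq_length.mp h false hf
        simp at this
      have h0 : xs.countP (fun x => x == true) ≠ 0 := by
        intro h
        have := List.countP_eq_zero.mp h true ht
        simp at this
      rw [if_neg (by exact_mod_cast h1), if_neg (by exact_mod_cast h0)]
      simp [hf, ht, pvTabla, PySem.List.pyGetD]
    · have h0 : xs.countP (fun x => x == true) = 0 := by
        apply List.countP_eq_zero.mpr
        intro a ha
        cases a
        · simp
        · exact absurd ha ht
      have hlen : xs.length ≠ 0 := by
        intro h
        rw [List.length_eq_zero_iff.mp h] at hf
        simp at hf
      rw [if_neg (by rw [h0]; exact_mod_cast fun h => hlen (by exact_mod_cast h.symm)),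
          if_pos (by exact_mod_cast h0)]
      simp [hf, ht, pvTabla, PySem.List.pyGetD]
  · have hlen : xs.countP (fun x => x == true) = xs.length := by
      apply List.countP_eq_length.mpr
      intro a ha
      cases a
      · exact absurd ha hf
      · simp
    rw [if_pos (by exact_mod_cast hlen)]
    by_cases ht : true ∈ xs <;> simp [hf, ht, pvTabla, PySem.List.pyGetD]

-- ===== VERDICT (by name: the statement is the Claim_ definition above) =====
theorem mostrarEstadoSala_spec : Claim_equal_mostrarEstadoSala := by
  intro a b c _
  show mostrarEstadoSala a b c = mostrarEstadoSala_alt a b c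
  unfold mostrarEstadoSala mostrarEstadoSala_alt
  simp only [List.foldl_cons, List.foldl_nil, cnt_eq, estado_eq]
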